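-- pv_equiv track=rewrite | github.com/ashleyharris-maptek-com-au/CodingBenchmark | 32.py | verify_steiner_tree
-- ===== SOURCE A (Python) =====
-- from typing import List, Tuple, Set, Dict, Any
--
-- def verify_steiner_tree(num_vertices: int, edges: List[Tuple[int, int, int]], terminals: Set[int],
--                         tree_edges: List[Tuple[int, int]]) -> Tuple[bool, int, str]:
--   """Verify tree connects all terminals. Returns (valid, weight, message)."""
--   edge_weights = {}
--   for u, v, w in edges:
--     edge_weights[(min(u, v), max(u, v))] = w
--
--   # Build adjacency from tree
--   adj = {}
--   total_weight = 0
--   for u, v in tree_edges: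
--     key = (min(u, v), max(u, v))
--     if key not in edge_weights:
--       return False, 0, f"Edge ({u},{v}) not in graph"
--     total_weight += edge_weights[key]
--     adj.setdefault(u, []).append(v)
--     adj.setdefault(v, []).append(u)
--
--   if not tree_edges:
--     return len(terminals) <= 1, 0, "Empty tree"
--
--   # BFS to check connectivity
--   start = tree_edges[0][0]
--   visited = {start}
--   queue = [start]
--   while queue:
--     v = queue.pop(0)
--     for u in adj.get(v, []):
--       if u not in visited:
--         visited.add(u)
--         queue.append(u)
--
--   missing = terminals - visited
--   if missing:
--     return False, total_weight, f"Terminals not connected: {missing}"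
--
--   return True, total_weight, "Valid"
-- ===== SOURCE B (Python) =====
-- def verify_steiner_tree(num_vertices, edges, terminals, tree_edges):
--   """Verify tree connects all terminals. Returns (valid, weight, message)."""
--   edge_weights = {(min(u, v), max(u, v)): w for u, v, w in edges}
--
--   bad = next((e for e in tree_edges if (min(e), max(e)) not in edge_weights), None)
--   if bad is not None:
--     return False, 0, f"Edge ({bad[0]},{bad[1]}) not in graph"
--   total_weight = sum(edge_weights.get((min(u, v), max(u, v)), 0) for u, v in tree_edges)
--
--   if not tree_edges:
--     return len(terminals) <= 1, 0, "Empty tree"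
--
--   # Union-find with eager relabelling: comp maps each tree vertex to its
--   # component label, members lists each label's vertices.
--   comp = {}
--   members = {}
--   for u, v in tree_edges:
--     for x in (u, v):
--       if x not in comp:
--         comp[x] = x
--         members[x] = [x]
--     ru, rv = comp[u], comp[v]
--     if ru != rv:
--       for x in members[ru]:
--         comp[x] = rv
--       members[rv].extend(members.pop(ru))
--
--   component = set(members[comp[tree_edges[0][0]]])
--   missing = terminals - component
--   if missing:
--     return False, total_weight, f"Terminals not connected: {missing}"
--
--   return True, total_weight, "Valid"
-- ===== Notes on version B (the rewrite author's own statement) =====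
-- stated objective: alternative
-- what changed: The connectivity check is re-done with a union-find that relabels eagerly (comp: vertex -> label, members: label -> vertices, merging classes per tree edge) instead of building an adjacency dict and running a BFS with a pop(0) queue, and the validation/weight pass becomes a first-invalid-edge search plus a sum.
import Mathlib
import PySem

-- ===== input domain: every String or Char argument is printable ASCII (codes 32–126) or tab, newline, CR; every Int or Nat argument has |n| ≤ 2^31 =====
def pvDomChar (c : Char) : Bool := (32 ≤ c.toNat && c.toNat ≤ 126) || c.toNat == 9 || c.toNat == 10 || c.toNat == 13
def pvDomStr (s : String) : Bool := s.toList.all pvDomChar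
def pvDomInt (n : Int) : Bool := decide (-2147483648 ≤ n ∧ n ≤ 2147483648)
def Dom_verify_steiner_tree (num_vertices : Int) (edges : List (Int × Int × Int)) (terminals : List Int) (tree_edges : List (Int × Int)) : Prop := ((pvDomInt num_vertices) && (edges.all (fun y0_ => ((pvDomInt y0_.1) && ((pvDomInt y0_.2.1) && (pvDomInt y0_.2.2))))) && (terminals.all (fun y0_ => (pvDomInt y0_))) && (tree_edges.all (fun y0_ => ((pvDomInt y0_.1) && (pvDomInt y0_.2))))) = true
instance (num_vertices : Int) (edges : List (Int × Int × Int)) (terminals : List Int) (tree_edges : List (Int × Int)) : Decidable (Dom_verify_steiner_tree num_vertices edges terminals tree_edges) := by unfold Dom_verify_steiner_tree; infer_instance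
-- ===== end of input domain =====

-- B replaces A's adjacency-dict-plus-BFS-queue connectivity check by a union-find with eager
-- relabelling (comp: vertex → component label, members: label → vertices), and replaces A's single
-- validate/sum/build loop by a first-invalid-edge search plus a weight sum; same return value.

-- `(min(u,v), max(u,v))`, the undirected edge key both Pythons use
def pvKey (u v : Int) : Int × Int := (min u v, max u v)

-- `edge_weights`: A builds it with a loop, B with the equivalent dict comprehension (later keys win in both)
def pvEdgeWeights (edges : List (Int × Int × Int)) : PySem.Dict (Int × Int) Int :=
  edges.foldl (fun d e => d.insert (pvKey e.1 e.2.1) e.2.2) PySem.Dict.empty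

-- CPython prints a set in hash order, which PySem does not model; this renderer (element order of the
-- value) is exact whenever `missing` has at most one element — Pre_ admits exactly those inputs.
def pvSetRepr (xs : List Int) : String :=
  "{" ++ String.intercalate ", " (xs.map PySem.Int.toStr) ++ "}"

-- ===== PORT A =====
-- A's tree loop: validate each edge, sum weights, and build the adjacency dict
-- (`adj.setdefault(u, []).append(v)` = `modify u [] (· ++ [v])`); `.inl (u,v)` is the early return.
def pvAdjLoop (ew : PySem.Dict (Int × Int) Int) :
    List (Int × Int) → PySem.Dict Int (List Int) → Int → (Int × Int) ⊕ (PySem.Dict Int (List Int) × Int)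
  | [], adj, tw => .inr (adj, tw)
  | (u, v) :: rest, adj, tw =>
    match ew.get? (pvKey u v) with
    | none => .inl (u, v)
    | some w =>
      pvAdjLoop ew rest ((adj.modify u [] (· ++ [v])).modify v [] (· ++ [u])) (tw + w)

-- BFS inner loop body: `for u in adj.get(v, []): if u not in visited: visited.add(u); queue.append(u)`
def pvBfsStep (s : PySem.Set Int × List Int) (u : Int) : PySem.Set Int × List Int :=
  if PySem.Set.contains s.1 u then s else (PySem.Set.add s.1 u, s.2 ++ [u])

-- `while queue: v = queue.pop(0); …` — fuel-bounded; 4*len(tree_edges)+2 provably outlasts the loop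
def pvBfs (adj : PySem.Dict Int (List Int)) : Nat → PySem.Set Int → List Int → PySem.Set Int
  | 0, visited, _ => visited
  | _ + 1, visited, [] => visited
  | fuel + 1, visited, v :: queue =>
    let s := (adj.getD v []).foldl pvBfsStep (visited, queue)
    pvBfs adj fuel s.1 s.2

def verify_steiner_tree (num_vertices : Int) (edges : List (Int × Int × Int)) (terminals : List Int) (tree_edges : List (Int × Int)) : Bool × Int × String :=
  let ew := pvEdgeWeights edges
  match pvAdjLoop ew tree_edges PySem.Dict.empty 0 with
  | .inl (u, v) => (false, 0, "Edge (" ++ PySem.Int.toStr u ++ "," ++ PySem.Int.toStr v ++ ") not in graph")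
  | .inr (adj, total_weight) =>
    match tree_edges with
    | [] => (decide (terminals.length ≤ 1), 0, "Empty tree")
    | (s0, _) :: _ =>
      let visited := pvBfs adj (4 * tree_edges.length + 2) (PySem.Set.add PySem.Set.empty s0) [s0]
      let missing := PySem.Set.diff terminals visited
      if missing.isEmpty then (true, total_weight, "Valid")
      else (false, total_weight, "Terminals not connected: " ++ pvSetRepr missing)

-- ===== PORT B =====
-- `if x not in comp: comp[x] = x; members[x] = [x]`
def pvEnsure (s : PySem.Dict Int Int × PySem.Dict Int (List Int)) (x : Int) :
    PySem.Dict Int Int × PySem.Dict Int (List Int) :=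
  if (s.1.get? x).isSome then s else (s.1.insert x x, s.2.insert x [x])

-- one iteration of B's union loop: register u,v, then merge u's class into v's
-- (`for x in members[ru]: comp[x] = rv` and `members[rv].extend(members.pop(ru))`)
def pvDsuStep (s : PySem.Dict Int Int × PySem.Dict Int (List Int)) (e : Int × Int) :
    PySem.Dict Int Int × PySem.Dict Int (List Int) :=
  let s2 := pvEnsure (pvEnsure s e.1) e.2
  let ru := s2.1.getD e.1 0  -- `comp[u]`; e.1 is keyed by pvEnsure just above
  let rv := s2.1.getD e.2 0  -- `comp[v]`
  if ru ≠ rv then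
    (((s2.2.getD ru []).foldl (fun c x => c.insert x rv) s2.1),
     (s2.2.erase ru).modify rv [] (· ++ s2.2.getD ru []))
  else s2

def verify_steiner_tree_alt (num_vertices : Int) (edges : List (Int × Int × Int)) (terminals : List Int) (tree_edges : List (Int × Int)) : Bool × Int × String :=
  let ew := pvEdgeWeights edges
  match tree_edges.find? (fun e => (ew.get? (pvKey e.1 e.2)).isNone) with
  | some e => (false, 0, "Edge (" ++ PySem.Int.toStr e.1 ++ "," ++ PySem.Int.toStr e.2 ++ ") not in graph")
  | none =>
    let total_weight := (tree_edges.map (fun e => ew.getD (pvKey e.1 e.2) 0)).sum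
    match tree_edges with
    | [] => (decide (terminals.length ≤ 1), 0, "Empty tree")
    | e0 :: _ =>
      let st := tree_edges.foldl pvDsuStep (PySem.Dict.empty, PySem.Dict.empty)
      -- `component = set(members[comp[tree_edges[0][0]]])`; e0.1 is keyed by the loop's first step
      let component := PySem.Set.ofList (st.2.getD (st.1.getD e0.1 0) [])
      let missing := PySem.Set.diff terminals component
      if missing.isEmpty then (true, total_weight, "Valid")
      else (false, total_weight, "Terminals not connected: " ++ pvSetRepr missing)

-- ===== PRECONDITION & SPEC =====
def pvVerts (te : List (Int × Int)) : List Int := te.flatMap (fun e => [e.1, e.2])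

-- one round of a reachability closure (used only to STATE Pre_, by neither port)
def pvStepPre (te : List (Int × Int)) (S : List Int) : List Int :=
  S ++ (pvVerts te).filter (fun v =>
    !S.contains v && decide (∃ e ∈ te, (e.1 = v ∧ e.2 ∈ S) ∨ (e.2 = v ∧ e.1 ∈ S)))

def pvReachPre (te : List (Int × Int)) : Nat → List Int → List Int
  | 0, S => S
  | n + 1, S => pvReachPre te n (pvStepPre te S)

-- Pre_ excludes only inputs on which at least TWO terminals are disconnected from tree_edges[0][0]:
-- there A's (and B's) message embeds the repr of a multi-element Python set, whose element order is a
-- hash-table artefact of CPython that the ports cannot model (A and B themselves agree on it).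
def Pre_verify_steiner_tree (num_vertices : Int) (edges : List (Int × Int × Int)) (terminals : List Int) (tree_edges : List (Int × Int)) : Prop :=
  tree_edges = [] ∨
  (∃ e ∈ tree_edges, pvKey e.1 e.2 ∉ edges.map (fun g => pvKey g.1 g.2.1)) ∨
  (terminals.filter (fun t =>
      !(pvReachPre tree_edges (pvVerts tree_edges).length [(tree_edges.headD (0, 0)).1]).contains t)).length ≤ 1
instance (num_vertices : Int) (edges : List (Int × Int × Int)) (terminals : List Int) (tree_edges : List (Int × Int)) : Decidable (Pre_verify_steiner_tree num_vertices edges terminals tree_edges) := by unfold Pre_verify_steiner_tree; infer_instance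

def pvWitness_verify_steiner_tree : Int × (List (Int × Int × Int)) × List Int × (List (Int × Int)) :=
  (4, [(0, 1, 5), (1, 2, 7), (0, 3, 2)], [0, 2, 3], [(1, 2), (0, 1)])

def Spec_verify_steiner_tree (num_vertices : Int) (edges : List (Int × Int × Int)) (terminals : List Int) (tree_edges : List (Int × Int)) (out : Bool × Int × String) : Prop := out = verify_steiner_tree_alt num_vertices edges terminals tree_edges
instance (num_vertices : Int) (edges : List (Int × Int × Int)) (terminals : List Int) (tree_edges : List (Int × Int)) (out : Bool × Int × String) : Decidable (Spec_verify_steiner_tree num_vertices edges terminals tree_edges out) := by unfold Spec_verify_steiner_tree; infer_instance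

-- ===== CLAIM (what is proved, stated in full; the proofs are below) =====
def Claim_equal_verify_steiner_tree : Prop := ∀ (num_vertices : Int) (edges : List (Int × Int × Int)) (terminals : List Int) (tree_edges : List (Int × Int)), Dom_verify_steiner_tree num_vertices edges terminals tree_edges → Pre_verify_steiner_tree num_vertices edges terminals tree_edges → Spec_verify_steiner_tree num_vertices edges terminals tree_edges (verify_steiner_tree num_vertices edges terminals tree_edges)

-- ===== LEMMAS AND PROOFS =====

-- T is closed under the (undirected) tree edges
def pvClosed (te : List (Int × Int)) (T : List Int) : Prop := ∀ e ∈ te, (e.1 ∈ T ↔ e.2 ∈ T)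

-- ---- phase 1: A's combined loop vs B's find?+sum ----

theorem pvAdjLoop_find?_some (ew : PySem.Dict (Int × Int) Int) :
    ∀ (te : List (Int × Int)) (e : Int × Int),
      te.find? (fun e => (ew.get? (pvKey e.1 e.2)).isNone) = some e →
      ∀ adj tw, pvAdjLoop ew te adj tw = .inl e := by
  intro te
  induction te with
  | nil => intro e h; simp at h
  | cons e0 rest ih =>
    intro e h adj tw
    obtain ⟨u, v⟩ := e0
    cases hw : ew.get? (pvKey u v) with
    | none =>
      simp only [List.find?_cons, hw, Option.isNone_none] at h
      simp only [pvAdjLoop, hw]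
      simp only [Option.some.injEq] at h
      rw [h]
    | some w =>
      simp only [List.find?_cons, hw, Option.isNone_some] at h
      simp only [pvAdjLoop, hw]
      exact ih e h _ _

theorem pvAdjLoop_find?_none (ew : PySem.Dict (Int × Int) Int) :
    ∀ (te : List (Int × Int)),
      te.find? (fun e => (ew.get? (pvKey e.1 e.2)).isNone) = none →
      ∀ adj tw, ∃ adj', pvAdjLoop ew te adj tw
        = .inr (adj', tw + (te.map (fun e => ew.getD (pvKey e.1 e.2) 0)).sum) := by
  intro te
  induction te with
  | nil => intro _ adj tw; exact ⟨adj, by simp [pvAdjLoop]⟩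
  | cons e0 rest ih =>
    intro h adj tw
    obtain ⟨u, v⟩ := e0
    cases hw : ew.get? (pvKey u v) with
    | none =>
      simp only [List.find?_cons, hw, Option.isNone_none] at h
      exact absurd h (by simp)
    | some w =>
      simp only [List.find?_cons, hw, Option.isNone_some] at h
      simp only [pvAdjLoop, hw]
      obtain ⟨adj', h'⟩ := ih h ((adj.modify u [] (· ++ [v])).modify v [] (· ++ [u])) (tw + w)
      refine ⟨adj', ?_⟩
      rw [h']
      have : ew.getD (pvKey u v) 0 = w := by
        rw [PySem.Dict.getD_eq_get?_getD, hw]; rfl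
      simp only [List.map_cons, List.sum_cons, this, add_assoc]

-- ---- A side: the BFS visited set is the least te-closed set containing the start ----

-- adjacency lists only ever gain members along the loop
theorem pvAdjLoop_mono (ew : PySem.Dict (Int × Int) Int) :
    ∀ (te : List (Int × Int)) (adj : PySem.Dict Int (List Int)) (tw : Int) (adj' : PySem.Dict Int (List Int)) (tw' : Int),
      pvAdjLoop ew te adj tw = .inr (adj', tw') →
      ∀ k x, x ∈ adj.getD k [] → x ∈ adj'.getD k [] := by
  intro te
  induction te with
  | nil => intro adj tw adj' tw' hrun k x hx; simp only [pvAdjLoop] at hrun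
           cases hrun; exact hx
  | cons e0 rest ih =>
    intro adj tw adj' tw' hrun k x hx
    obtain ⟨u, v⟩ := e0
    simp only [pvAdjLoop] at hrun
    cases h : ew.get? (pvKey u v) with
    | none => rw [h] at hrun; cases hrun
    | some w =>
      rw [h] at hrun
      refine ih _ _ _ _ hrun k x ?_
      have h1 : x ∈ (adj.modify u [] (· ++ [v])).getD k [] := by
        rw [PySem.Dict.getD_modify]
        split_ifs with hk
        · subst hk; exact List.mem_append_left _ hx
        · exact hx
      rw [PySem.Dict.getD_modify]
      split_ifs with hk
      · subst hk; exact List.mem_append_left _ h1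
      · exact h1

-- every processed edge is recorded in both directions
theorem pvAdjLoop_edges (ew : PySem.Dict (Int × Int) Int) :
    ∀ (te : List (Int × Int)) (adj : PySem.Dict Int (List Int)) (tw : Int) (adj' : PySem.Dict Int (List Int)) (tw' : Int),
      pvAdjLoop ew te adj tw = .inr (adj', tw') →
      ∀ e ∈ te, e.2 ∈ adj'.getD e.1 [] ∧ e.1 ∈ adj'.getD e.2 [] := by
  intro te
  induction te with
  | nil => intro adj tw adj' tw' _ e he; simp at he
  | cons e0 rest ih =>
    intro adj tw adj' tw' hrun e he
    obtain ⟨u, v⟩ := e0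
    simp only [pvAdjLoop] at hrun
    cases h : ew.get? (pvKey u v) with
    | none => rw [h] at hrun; cases hrun
    | some w =>
      rw [h] at hrun
      rcases List.mem_cons.1 he with rfl | hmem
      · -- the freshly recorded edge survives the rest of the loop by monotonicity
        have h2 : v ∈ ((adj.modify u [] (· ++ [v])).modify v [] (· ++ [u])).getD u [] := by
          rw [PySem.Dict.getD_modify]
          split_ifs with hk
          · rw [hk, PySem.Dict.getD_modify, if_pos rfl]
            exact List.mem_append_left _ (List.mem_append_right _ (by simp))
          · rw [PySem.Dict.getD_modify, if_pos rfl]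
            simp
        have h1 : u ∈ ((adj.modify u [] (· ++ [v])).modify v [] (· ++ [u])).getD v [] := by
          rw [PySem.Dict.getD_modify, if_pos rfl]
          simp
        exact ⟨pvAdjLoop_mono ew rest _ _ _ _ hrun _ _ h2,
               pvAdjLoop_mono ew rest _ _ _ _ hrun _ _ h1⟩
      · exact ih _ _ _ _ hrun e hmem

-- one `setdefault … append` step adds only its appended vertex
theorem pvModify_getD_sub (d : PySem.Dict Int (List Int)) (a b k x : Int)
    (hx : x ∈ (d.modify a [] (· ++ [b])).getD k []) : x ∈ d.getD k [] ∨ (k = a ∧ x = b) := by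
  rw [PySem.Dict.getD_modify] at hx
  split_ifs at hx with hk
  · rcases List.mem_append.1 hx with h | h
    · subst hk; exact Or.inl h
    · simp only [List.mem_singleton] at h; exact Or.inr ⟨hk, h⟩
  · exact Or.inl hx

-- adjacency lists contain only tree-edge endpoints
theorem pvAdjLoop_sub (ew : PySem.Dict (Int × Int) Int) :
    ∀ (te : List (Int × Int)) (adj : PySem.Dict Int (List Int)) (tw : Int) (adj' : PySem.Dict Int (List Int)) (tw' : Int),
      pvAdjLoop ew te adj tw = .inr (adj', tw') →
      ∀ k x, x ∈ adj'.getD k [] → x ∈ adj.getD k [] ∨ x ∈ pvVerts te := by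
  intro te
  induction te with
  | nil => intro adj tw adj' tw' hrun k x hx
           simp only [pvAdjLoop] at hrun; cases hrun; exact Or.inl hx
  | cons e0 rest ih =>
    intro adj tw adj' tw' hrun k x hx
    obtain ⟨u, v⟩ := e0
    simp only [pvAdjLoop] at hrun
    cases h : ew.get? (pvKey u v) with
    | none => rw [h] at hrun; cases hrun
    | some w =>
      rw [h] at hrun
      have hverts : u ∈ pvVerts ((u, v) :: rest) ∧ v ∈ pvVerts ((u, v) :: rest) := by
        simp [pvVerts]
      rcases ih _ _ _ _ hrun k x hx with h2 | h2
      · rcases pvModify_getD_sub _ _ _ _ _ h2 with h3 | h3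
        · rcases pvModify_getD_sub _ _ _ _ _ h3 with h4 | h4
          · exact Or.inl h4
          · exact Or.inr (h4.2 ▸ hverts.2)
        · exact Or.inr (h3.2 ▸ hverts.1)
      · right
        simp only [pvVerts, List.flatMap_cons, List.mem_append] at h2 ⊢
        exact Or.inr h2

-- adjacency lists record only actual tree edges (in one of the two directions)
theorem pvAdjLoop_pairs (ew : PySem.Dict (Int × Int) Int) :
    ∀ (te : List (Int × Int)) (adj : PySem.Dict Int (List Int)) (tw : Int) (adj' : PySem.Dict Int (List Int)) (tw' : Int),
      pvAdjLoop ew te adj tw = .inr (adj', tw') →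
      ∀ k x, x ∈ adj'.getD k [] → x ∈ adj.getD k [] ∨ (k, x) ∈ te ∨ (x, k) ∈ te := by
  intro te
  induction te with
  | nil => intro adj tw adj' tw' hrun k x hx
           simp only [pvAdjLoop] at hrun; cases hrun; exact Or.inl hx
  | cons e0 rest ih =>
    intro adj tw adj' tw' hrun k x hx
    obtain ⟨u, v⟩ := e0
    simp only [pvAdjLoop] at hrun
    cases h : ew.get? (pvKey u v) with
    | none => rw [h] at hrun; cases hrun
    | some w =>
      rw [h] at hrun
      rcases ih _ _ _ _ hrun k x hx with h2 | h2 | h2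
      · rcases pvModify_getD_sub _ _ _ _ _ h2 with h3 | h3
        · rcases pvModify_getD_sub _ _ _ _ _ h3 with h4 | h4
          · exact Or.inl h4
          · exact Or.inr (Or.inl (by simp [h4.1, h4.2]))
        · exact Or.inr (Or.inr (by simp [h3.1, h3.2]))
      · exact Or.inr (Or.inl (List.mem_cons_of_mem _ h2))
      · exact Or.inr (Or.inr (List.mem_cons_of_mem _ h2))

-- the BFS inner fold appends exactly the fresh neighbours to both visited and queue
theorem pvBfsStep_fold :
    ∀ (L : List Int) (visited : PySem.Set Int) (queue : List Int), visited.Nodup →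
      ∃ Δ : List Int,
        L.foldl pvBfsStep (visited, queue) = (visited ++ Δ, queue ++ Δ) ∧ Δ.Nodup ∧
        (∀ d ∈ Δ, d ∈ L ∧ d ∉ visited) ∧ (∀ y ∈ L, y ∈ visited ++ Δ) := by
  intro L
  induction L with
  | nil => intro visited queue _; exact ⟨[], by simp⟩
  | cons y L ih =>
    intro visited queue hnd
    simp only [List.foldl_cons, pvBfsStep]
    by_cases hy : y ∈ visited
    · rw [if_pos (by simpa [PySem.Set.contains] using hy)]
      obtain ⟨Δ, h1, h2, h3, h4⟩ := ih visited queue hnd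
      refine ⟨Δ, h1, h2, fun d hd => ⟨List.mem_cons_of_mem _ (h3 d hd).1, (h3 d hd).2⟩, ?_⟩
      intro z hz
      rcases List.mem_cons.1 hz with rfl | hz
      · exact List.mem_append_left _ hy
      · exact h4 z hz
    · rw [if_neg (by simpa [PySem.Set.contains] using hy)]
      have hadd : PySem.Set.add visited y = visited ++ [y] := PySem.Set.add_of_not_mem hy
      rw [hadd]
      have hnd' : (visited ++ [y]).Nodup :=
        hnd.append (List.nodup_singleton y) (List.disjoint_singleton.mpr hy)
      obtain ⟨Δ, h1, h2, h3, h4⟩ := ih (visited ++ [y]) (queue ++ [y]) hnd'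
      refine ⟨y :: Δ, ?_, ?_, ?_, ?_⟩
      · rw [h1]; simp
      · refine List.nodup_cons.2 ⟨?_, h2⟩
        intro hyΔ
        exact (h3 y hyΔ).2 (by simp)
      · intro d hd
        rcases List.mem_cons.1 hd with rfl | hd
        · exact ⟨by simp, hy⟩
        · have := h3 d hd
          exact ⟨List.mem_cons_of_mem _ this.1, fun hmem => this.2 (List.mem_append_left _ hmem)⟩
      · intro z hz
        rcases List.mem_cons.1 hz with rfl | hz
        · simp
        · have := h4 z hz
          simp only [List.append_assoc, List.singleton_append] at this ⊢
          exact this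

-- counting helper: one fresh vertex marked visited strictly shrinks the unvisited part of U
theorem pvFilter_drop_one (U : List Int) (visited : List Int) (d : Int)
    (hdU : d ∈ U) (hdv : d ∉ visited) :
    (U.filter (fun u => !(visited ++ [d]).contains u)).length + 1
      ≤ (U.filter (fun u => !visited.contains u)).length := by
  have hfil : U.filter (fun u => !(visited ++ [d]).contains u)
      = (U.filter (fun u => !visited.contains u)).filter (fun u => u ≠ d) := by
    rw [List.filter_filter]
    apply List.filter_congr
    intro a _
    simp only [List.contains_append, List.contains_cons, List.contains_nil]
    cases h : visited.contains a <;> simp [Bool.beq_eq_decide_eq]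
  have hd : d ∈ U.filter (fun u => !visited.contains u) := by
    simp only [List.mem_filter, Bool.not_eq_eq_eq_not, Bool.not_true]
    exact ⟨hdU, by simpa [List.contains_iff_mem] using hdv⟩
  have := List.length_filter_lt_length_iff_exists
    (l := U.filter (fun u => !visited.contains u)) (p := fun u => decide (u ≠ d))
  rw [hfil]
  have hlt : ((U.filter (fun u => !visited.contains u)).filter (fun u => decide (u ≠ d))).length
      < (U.filter (fun u => !visited.contains u)).length := by
    rw [this]
    exact ⟨d, hd, by simp⟩
  omega

-- counting helper: marking the fresh Δ visited shrinks the unvisited part of U by |Δ|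
theorem pvFilter_drop (U : List Int) (visited Δ : List Int) (hΔ : Δ.Nodup)
    (hsub : ∀ d ∈ Δ, d ∈ U ∧ d ∉ visited) :
    (U.filter (fun u => !(visited ++ Δ).contains u)).length + Δ.length
      ≤ (U.filter (fun u => !visited.contains u)).length := by
  induction Δ generalizing visited with
  | nil => simp
  | cons d Δ' ih =>
    obtain ⟨hdU, hdv⟩ := hsub d (by simp)
    have h1 := pvFilter_drop_one U visited d hdU hdv
    have h2 := ih (visited ++ [d]) (List.nodup_cons.1 hΔ).2 (by
      intro x hx
      obtain ⟨hxU, hxv⟩ := hsub x (List.mem_cons_of_mem _ hx)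
      refine ⟨hxU, ?_⟩
      simp only [List.mem_append, List.mem_singleton]
      rintro (h | rfl)
      · exact hxv h
      · exact (List.nodup_cons.1 hΔ).1 hx)
    rw [List.append_assoc, List.singleton_append] at h2
    simp only [List.length_cons]
    omega

-- main BFS lemma: with enough fuel the result extends visited and is closed under adjacency
theorem pvBfs_closed (adj : PySem.Dict Int (List Int)) (U : List Int)
    (hadj : ∀ k x, x ∈ adj.getD k [] → x ∈ U) :
    ∀ (fuel : Nat) (visited : PySem.Set Int) (queue : List Int),
      visited.Nodup → queue.Nodup →
      (∀ x ∈ queue, x ∈ visited) → (∀ x ∈ visited, x ∈ U) →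
      (∀ x ∈ visited, x ∉ queue → ∀ y ∈ adj.getD x [], y ∈ visited) →
      queue.length + 2 * (U.filter (fun u => !visited.contains u)).length ≤ fuel →
      (∀ x ∈ visited, x ∈ pvBfs adj fuel visited queue) ∧
      (∀ x ∈ pvBfs adj fuel visited queue, ∀ y ∈ adj.getD x [], y ∈ pvBfs adj fuel visited queue) := by
  intro fuel
  induction fuel with
  | zero =>
    intro visited queue _ _ _ _ hclosed hfuel
    have hq : queue = [] := by
      cases queue with
      | nil => rfl
      | cons a l => simp at hfuel
    subst hq
    exact ⟨fun x hx => hx, fun x hx y hy => hclosed x hx (by simp) y hy⟩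
  | succ fuel ih =>
    intro visited queue hndv hndq hqv hvU hclosed hfuel
    cases queue with
    | nil =>
      exact ⟨fun x hx => hx, fun x hx y hy => hclosed x hx (by simp) y hy⟩
    | cons v qt =>
      simp only [pvBfs]
      obtain ⟨Δ, hfold, hΔnd, hΔ, hL⟩ := pvBfsStep_fold (adj.getD v []) visited qt hndv
      rw [hfold]
      have hΔU : ∀ d ∈ Δ, d ∈ U := fun d hd => hadj v d (hΔ d hd).1
      have hqtnd : qt.Nodup := (List.nodup_cons.1 hndq).2
      have hvqt : v ∉ qt := (List.nodup_cons.1 hndq).1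
      have hcnt := pvFilter_drop U visited Δ hΔnd (fun d hd => ⟨hΔU d hd, (hΔ d hd).2⟩)
      have hmain := ih (visited ++ Δ) (qt ++ Δ)
        (hndv.append hΔnd (fun a ha hb => (hΔ a hb).2 ha))
        (hqtnd.append hΔnd (fun a ha hb => (hΔ a hb).2 (hqv a (List.mem_cons_of_mem _ ha))))
        (by
          intro x hx
          rcases List.mem_append.1 hx with hx | hx
          · exact List.mem_append_left _ (hqv x (List.mem_cons_of_mem _ hx))
          · exact List.mem_append_right _ hx)
        (by
          intro x hx
          rcases List.mem_append.1 hx with hx | hx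
          · exact hvU x hx
          · exact hΔU x hx)
        (by
          intro x hx hxq y hy
          rcases List.mem_append.1 hx with hx | hx
          · by_cases hxv : x = v
            · subst hxv
              exact hL y hy
            · have hxq' : x ∉ v :: qt := by
                simp only [List.mem_cons, not_or]
                exact ⟨hxv, fun h => hxq (List.mem_append_left _ h)⟩
              exact List.mem_append_left _ (hclosed x hx hxq' y hy)
          · exact absurd (List.mem_append_right _ hx) hxq)
        (by
          have hcnt' : (U.filter (fun u => !(visited ++ Δ).contains u)).length + Δ.length
              ≤ (U.filter (fun u => !visited.contains u)).length := hcnt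
          simp only [List.length_cons, List.length_append] at hfuel ⊢
          omega)
      refine ⟨?_, hmain.2⟩
      intro x hx
      exact hmain.1 x (List.mem_append_left _ hx)

-- the BFS result stays inside any set T closed under single adjacency steps
theorem pvBfs_subset (adj : PySem.Dict Int (List Int)) (T : List Int)
    (hT : ∀ k x, k ∈ T → x ∈ adj.getD k [] → x ∈ T) :
    ∀ (fuel : Nat) (visited : PySem.Set Int) (queue : List Int),
      visited.Nodup → (∀ x ∈ queue, x ∈ visited) → (∀ x ∈ visited, x ∈ T) →
      ∀ x ∈ pvBfs adj fuel visited queue, x ∈ T := by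
  intro fuel
  induction fuel with
  | zero => intro visited queue _ _ hvT x hx; exact hvT x hx
  | succ fuel ih =>
    intro visited queue hnd hqv hvT x hx
    cases queue with
    | nil => exact hvT x hx
    | cons v qt =>
      simp only [pvBfs] at hx
      obtain ⟨Δ, hfold, hΔnd, hΔ, _⟩ := pvBfsStep_fold (adj.getD v []) visited qt hnd
      rw [hfold] at hx
      have hΔT : ∀ d ∈ Δ, d ∈ T :=
        fun d hd => hT v d (hvT v (hqv v (by simp))) (hΔ d hd).1
      refine ih (visited ++ Δ) (qt ++ Δ)
        (hnd.append hΔnd (fun a ha hb => (hΔ a hb).2 ha))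
        (by
          intro z hz
          rcases List.mem_append.1 hz with hz | hz
          · exact List.mem_append_left _ (hqv z (List.mem_cons_of_mem _ hz))
          · exact List.mem_append_right _ hz)
        (by
          intro z hz
          rcases List.mem_append.1 hz with hz | hz
          · exact hvT z hz
          · exact hΔT z hz)
        x hx

theorem pvFoldAdd_len (xs : List Int) : ∀ s : PySem.Set Int, (xs.foldl PySem.Set.add s).length ≤ s.length + xs.length := by
  induction xs with
  | nil => intro s; simp
  | cons x xs ih =>
    intro s
    simp only [List.foldl_cons, List.length_cons]
    refine le_trans (ih (s.add x)) ?_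
    rw [PySem.Set.add_eq_ite]
    split_ifs
    · omega
    · simp; omega

theorem pvOfList_len (xs : List Int) : (PySem.Set.ofList xs).length ≤ xs.length := by
  rw [PySem.Set.ofList_eq_foldl]
  simpa using pvFoldAdd_len xs []

theorem pvVerts_length (te : List (Int × Int)) : (pvVerts te).length = 2 * te.length := by
  induction te with
  | nil => rfl
  | cons e rest ih => simp [pvVerts, List.flatMap_cons] at ih ⊢; omega

-- ---- B side: the union-find component is the least te-closed set containing the start ----

theorem pvGetD_erase (d : PySem.Dict Int (List Int)) (k k' : Int) :
    (d.erase k).getD k' [] = if k' = k then [] else d.getD k' [] := by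
  have h : (d.erase k).get? k' = if k' = k then none else d.get? k' := by
    obtain ⟨l⟩ := d
    induction l with
    | nil => simp [PySem.Dict.erase, PySem.Dict.get?]
    | cons p rest ih =>
      simp only [PySem.Dict.erase, PySem.Dict.get?, List.filter_cons] at *
      by_cases hpk : p.1 = k
      · rw [if_neg (by simp [hpk]), ih]
        by_cases hk' : k' = k
        · simp [hk']
        · rw [if_neg hk', if_neg hk',
            List.find?_cons_of_neg (by simp [beq_iff_eq, hpk]; exact fun h => hk' h.symm)]
      · rw [if_pos (by simp [hpk])]
        by_cases hpk' : p.1 = k'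
        · rw [List.find?_cons_of_pos (by simp [hpk']),
            List.find?_cons_of_pos (by simp [hpk']),
            if_neg (fun h => hpk (hpk'.trans h))]
        · rw [List.find?_cons_of_neg (by simpa [beq_iff_eq] using hpk'),
            List.find?_cons_of_neg (by simpa [beq_iff_eq] using hpk'), ih]
  rw [PySem.Dict.getD_eq_get?_getD, PySem.Dict.getD_eq_get?_getD, h]
  split_ifs <;> rfl

theorem pvGet?_foldl_insert (L : List Int) (rv : Int) :
    ∀ (c : PySem.Dict Int Int) (y : Int),
      (L.foldl (fun c x => c.insert x rv) c).get? y = if y ∈ L then some rv else c.get? y := by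
  induction L with
  | nil => intro c y; simp
  | cons x L ih =>
    intro c y
    simp only [List.foldl_cons, ih, List.mem_cons]
    by_cases hyL : y ∈ L
    · simp [hyL]
    · rw [if_neg hyL, PySem.Dict.get?_insert]
      by_cases hyx : y = x
      · simp [hyx]
      · simp [hyx, hyL]

-- the union-find invariant: labels are self-labelled; members lists are exactly the label classes;
-- equally-labelled vertices lie on the same side of every te-closed set
def pvDsuInv (te : List (Int × Int)) (s : PySem.Dict Int Int × PySem.Dict Int (List Int)) : Prop :=
  (∀ x l, s.1.get? x = some l → s.1.get? l = some l) ∧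
  (∀ l x, x ∈ s.2.getD l [] ↔ s.1.get? x = some l) ∧
  (∀ T : List Int, pvClosed te T → ∀ x y l, s.1.get? x = some l → s.1.get? y = some l → (x ∈ T ↔ y ∈ T))

theorem pvEnsure_mono (s : PySem.Dict Int Int × PySem.Dict Int (List Int)) (x y l : Int)
    (h : s.1.get? y = some l) : (pvEnsure s x).1.get? y = some l := by
  unfold pvEnsure
  split_ifs with hs
  · exact h
  · rw [PySem.Dict.get?_insert]
    split_ifs with hyx
    · subst hyx; rw [h] at hs; simp at hs
    · exact h

theorem pvEnsure_some (s : PySem.Dict Int Int × PySem.Dict Int (List Int)) (x : Int) :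
    ((pvEnsure s x).1.get? x).isSome := by
  unfold pvEnsure
  split_ifs with hs
  · exact hs
  · simp [PySem.Dict.get?_insert_self]

theorem pvEnsure_inv (te : List (Int × Int)) (s : PySem.Dict Int Int × PySem.Dict Int (List Int)) (x : Int)
    (hInv : pvDsuInv te s) : pvDsuInv te (pvEnsure s x) := by
  obtain ⟨hI4, hI2, hJ⟩ := hInv
  unfold pvEnsure
  split_ifs with hs
  · exact ⟨hI4, hI2, hJ⟩
  · have hnone : s.1.get? x = none := by
      cases h : s.1.get? x
      · rfl
      · rw [h] at hs; simp at hs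
    -- no existing vertex can carry the fresh label x
    have hfresh : ∀ y l, s.1.get? y = some l → l ≠ x := by
      intro y l hy hlx
      have h2 : s.1.get? x = some x := hI4 y x (hlx ▸ hy)
      rw [h2] at hnone
      simp at hnone
    refine ⟨?_, ?_, ?_⟩
    · intro y l hy
      rw [PySem.Dict.get?_insert] at hy ⊢
      split_ifs at hy with hyx
      · have hlx2 : l = x := (Option.some.inj hy).symm
        rw [if_pos hlx2, hlx2]
      · rw [if_neg (hfresh y l hy)]
        exact hI4 y l hy
    · intro l y
      rw [PySem.Dict.getD_insert, PySem.Dict.get?_insert]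
      by_cases hlx : l = x
      · rw [if_pos hlx]
        by_cases hyx : y = x
        · rw [if_pos hyx]
          simp [hyx, hlx]
        · rw [if_neg hyx]
          simp only [List.mem_singleton]
          constructor
          · intro h; exact absurd h hyx
          · intro hy; exact absurd hlx (hfresh y l hy)
      · rw [if_neg hlx]
        by_cases hyx : y = x
        · rw [if_pos hyx]
          constructor
          · intro hmem
            have hm := (hI2 l y).1 hmem
            rw [hyx, hnone] at hm
            exact absurd hm (by simp)
          · intro h
            exact absurd (Option.some.inj h).symm hlx
        · rw [if_neg hyx]
          exact hI2 l y
    · intro T hT y z l hy hz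
      rw [PySem.Dict.get?_insert] at hy hz
      split_ifs at hy hz with h1 h2 h2
      · rw [h1, h2]
      · exact absurd (Option.some.inj hy).symm (hfresh z l hz)
      · exact absurd (Option.some.inj hz).symm (hfresh y l hy)
      · exact hJ T hT y z l hy hz

-- the step either leaves the (registered) state alone or performs the merge, by label comparison
theorem pvDsuStep_cases (s : PySem.Dict Int Int × PySem.Dict Int (List Int)) (e : Int × Int) :
    ∃ ru rv, (pvEnsure (pvEnsure s e.1) e.2).1.get? e.1 = some ru ∧
             (pvEnsure (pvEnsure s e.1) e.2).1.get? e.2 = some rv ∧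
      ((ru = rv ∧ pvDsuStep s e = pvEnsure (pvEnsure s e.1) e.2) ∨
       (ru ≠ rv ∧ pvDsuStep s e =
         (((pvEnsure (pvEnsure s e.1) e.2).2.getD ru []).foldl (fun c x => c.insert x rv)
            (pvEnsure (pvEnsure s e.1) e.2).1,
          ((pvEnsure (pvEnsure s e.1) e.2).2.erase ru).modify rv []
            (· ++ (pvEnsure (pvEnsure s e.1) e.2).2.getD ru [])))) := by
  obtain ⟨a, ha⟩ := Option.isSome_iff_exists.1 (pvEnsure_some s e.1)
  have hru : (pvEnsure (pvEnsure s e.1) e.2).1.get? e.1 = some a :=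
    pvEnsure_mono (pvEnsure s e.1) e.2 e.1 a ha
  set ru := a with hru_def
  obtain ⟨rv, hrv⟩ := Option.isSome_iff_exists.1 (pvEnsure_some (pvEnsure s e.1) e.2)
  refine ⟨ru, rv, hru, hrv, ?_⟩
  have hgu : (pvEnsure (pvEnsure s e.1) e.2).1.getD e.1 0 = ru := by
    rw [PySem.Dict.getD_eq_get?_getD, hru]; rfl
  have hgv : (pvEnsure (pvEnsure s e.1) e.2).1.getD e.2 0 = rv := by
    rw [PySem.Dict.getD_eq_get?_getD, hrv]; rfl
  by_cases hne : ru = rv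
  · left
    refine ⟨hne, ?_⟩
    simp only [pvDsuStep, hgu, hgv]
    rw [if_neg (by simp [hne])]
  · right
    refine ⟨hne, ?_⟩
    simp only [pvDsuStep, hgu, hgv]
    rw [if_pos hne]

-- the merge workhorse: merging preserves the invariant, and relabels by label alone
theorem pvMerge_inv (te : List (Int × Int)) (s2 : PySem.Dict Int Int × PySem.Dict Int (List Int))
    (hInv : pvDsuInv te s2) (u v ru rv : Int) (he : (u, v) ∈ te)
    (hru : s2.1.get? u = some ru) (hrv : s2.1.get? v = some rv) (hne : ru ≠ rv) :
    pvDsuInv te ((s2.2.getD ru []).foldl (fun c x => c.insert x rv) s2.1,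
                 (s2.2.erase ru).modify rv [] (· ++ s2.2.getD ru [])) ∧
    (∀ y l, s2.1.get? y = some l →
      ((s2.2.getD ru []).foldl (fun c x => c.insert x rv) s2.1).get? y
        = some (if l = ru then rv else l)) := by
  obtain ⟨hI4, hI2, hJ⟩ := hInv
  -- the fold relabels exactly the old ru-class to rv
  have hF : ∀ y, ((s2.2.getD ru []).foldl (fun c x => c.insert x rv) s2.1).get? y
      = if s2.1.get? y = some ru then some rv else s2.1.get? y := by
    intro y
    rw [pvGet?_foldl_insert]
    by_cases hm : y ∈ s2.2.getD ru []
    · rw [if_pos hm, if_pos ((hI2 ru y).1 hm)]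
    · rw [if_neg hm, if_neg (fun h => hm ((hI2 ru y).2 h))]
  have hmap : ∀ y l, s2.1.get? y = some l →
      ((s2.2.getD ru []).foldl (fun c x => c.insert x rv) s2.1).get? y
        = some (if l = ru then rv else l) := by
    intro y l hy
    rw [hF y, hy]
    by_cases hlru : l = ru
    · rw [if_pos (by rw [hlru]), if_pos hlru]
    · rw [if_neg (by intro h; exact hlru (Option.some.inj h)), if_neg hlru]
  refine ⟨⟨?_, ?_, ?_⟩, hmap⟩
  · -- I4
    intro y l hy
    rw [hF y] at hy
    split_ifs at hy with hc
    · have hlrv : l = rv := (Option.some.inj hy).symm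
      rw [hlrv, hF rv, if_neg (by
          rw [hI4 v rv hrv]
          intro h
          exact hne (Option.some.inj h).symm)]
      exact hI4 v rv hrv
    · have hl := hI4 y l hy
      rw [hF l, if_neg (by
          rw [hl]
          intro h
          exact hc (hy.trans (congrArg some (Option.some.inj h))))]
      exact hl
  · -- I2
    intro l x
    rw [PySem.Dict.getD_modify]
    by_cases hlrv : l = rv
    · rw [if_pos hlrv, pvGetD_erase, if_neg (fun h => hne h.symm)]
      rw [List.mem_append, hI2 rv x, hI2 ru x, hF x]
      constructor
      · rintro (hx | hx)
        · rw [if_neg (by rw [hx]; intro h; exact hne (Option.some.inj h).symm), hx, hlrv]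
        · rw [if_pos hx, hlrv]
      · intro hx
        split_ifs at hx with hc
        · exact Or.inr hc
        · exact Or.inl (by rw [hx, hlrv])
    · rw [if_neg hlrv, pvGetD_erase, hF x]
      by_cases hlru : l = ru
      · rw [if_pos hlru]
        simp only [List.not_mem_nil, false_iff]
        intro hx
        split_ifs at hx with hc
        · exact hlrv (Option.some.inj hx).symm
        · exact hc (hlru ▸ hx)
      · rw [if_neg hlru, hI2 l x]
        split_ifs with hc
        · constructor
          · intro hx; exact absurd (hx.symm.trans hc) (fun h => hlru (Option.some.inj h))
          · intro hx; exact absurd (Option.some.inj hx).symm hlrv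
        · exact Iff.rfl
  · -- J
    intro T hT x y l hx hy
    rw [hF x] at hx
    rw [hF y] at hy
    have hedge : u ∈ T ↔ v ∈ T := hT (u, v) he
    split_ifs at hx hy with hcx hcy hcy
    · exact hJ T hT x y ru hcx hcy
    · have hlrv : l = rv := (Option.some.inj hx).symm
      rw [hlrv] at hy
      calc (x ∈ T) ↔ (u ∈ T) := hJ T hT x u ru hcx hru
        _ ↔ (v ∈ T) := hedge
        _ ↔ (y ∈ T) := hJ T hT v y rv hrv hy
    · have hlrv : l = rv := (Option.some.inj hy).symm
      rw [hlrv] at hx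
      calc (x ∈ T) ↔ (v ∈ T) := hJ T hT x v rv hx hrv
        _ ↔ (u ∈ T) := hedge.symm
        _ ↔ (y ∈ T) := hJ T hT u y ru hru hcy
    · exact hJ T hT x y l hx hy

theorem pvDsuStep_inv (te : List (Int × Int)) (s : PySem.Dict Int Int × PySem.Dict Int (List Int))
    (e : Int × Int) (he : e ∈ te) (hInv : pvDsuInv te s) : pvDsuInv te (pvDsuStep s e) := by
  have hInv2 : pvDsuInv te (pvEnsure (pvEnsure s e.1) e.2) :=
    pvEnsure_inv te _ e.2 (pvEnsure_inv te s e.1 hInv)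
  obtain ⟨ru, rv, hru, hrv, hcase | hcase⟩ := pvDsuStep_cases s e
  · rw [hcase.2]; exact hInv2
  · rw [hcase.2]
    exact (pvMerge_inv te _ hInv2 e.1 e.2 ru rv (by simpa using he) hru hrv hcase.1).1

-- the step relabels uniformly: a vertex's new label is a function of its old label alone
theorem pvDsuStep_map (te : List (Int × Int)) (s : PySem.Dict Int Int × PySem.Dict Int (List Int))
    (e : Int × Int) (he : e ∈ te) (hInv : pvDsuInv te s) :
    ∃ f : Int → Int, ∀ y l, s.1.get? y = some l → (pvDsuStep s e).1.get? y = some (f l) := by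
  have hInv2 : pvDsuInv te (pvEnsure (pvEnsure s e.1) e.2) :=
    pvEnsure_inv te _ e.2 (pvEnsure_inv te s e.1 hInv)
  obtain ⟨ru, rv, hru, hrv, hcase | hcase⟩ := pvDsuStep_cases s e
  · refine ⟨id, fun y l hy => ?_⟩
    rw [hcase.2]
    exact pvEnsure_mono _ e.2 y l (pvEnsure_mono s e.1 y l hy)
  · refine ⟨fun l => if l = ru then rv else l, fun y l hy => ?_⟩
    rw [hcase.2]
    exact (pvMerge_inv te _ hInv2 e.1 e.2 ru rv he hru hrv hcase.1).2 y l
      (pvEnsure_mono _ e.2 y l (pvEnsure_mono s e.1 y l hy))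

-- after its own step, an edge's endpoints carry the same label
theorem pvDsuStep_eq (te : List (Int × Int)) (s : PySem.Dict Int Int × PySem.Dict Int (List Int))
    (e : Int × Int) (he : e ∈ te) (hInv : pvDsuInv te s) :
    ∃ l, (pvDsuStep s e).1.get? e.1 = some l ∧ (pvDsuStep s e).1.get? e.2 = some l := by
  have hInv2 : pvDsuInv te (pvEnsure (pvEnsure s e.1) e.2) :=
    pvEnsure_inv te _ e.2 (pvEnsure_inv te s e.1 hInv)
  obtain ⟨ru, rv, hru, hrv, hcase | hcase⟩ := pvDsuStep_cases s e
  · exact ⟨ru, by rw [hcase.2]; exact hru, by rw [hcase.2, hrv, hcase.1]⟩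
  · have hmap := (pvMerge_inv te _ hInv2 e.1 e.2 ru rv he hru hrv hcase.1).2
    refine ⟨rv, ?_, ?_⟩
    · rw [hcase.2]
      have := hmap e.1 ru hru
      rwa [if_pos rfl] at this
    · rw [hcase.2]
      have := hmap e.2 rv hrv
      rwa [if_neg (fun h => hcase.1 h.symm)] at this

theorem pvDsuFold_inv (te : List (Int × Int)) :
    ∀ (l : List (Int × Int)), (∀ e ∈ l, e ∈ te) →
      ∀ s, pvDsuInv te s → pvDsuInv te (l.foldl pvDsuStep s) := by
  intro l
  induction l with
  | nil => intro _ s hInv; exact hInv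
  | cons e rest ih =>
    intro hsub s hInv
    exact ih (fun e' he' => hsub e' (List.mem_cons_of_mem _ he')) _
      (pvDsuStep_inv te s e (hsub e (by simp)) hInv)

theorem pvDsuFold_map (te : List (Int × Int)) :
    ∀ (l : List (Int × Int)), (∀ e ∈ l, e ∈ te) →
      ∀ s, pvDsuInv te s →
      ∃ f : Int → Int, ∀ y lb, s.1.get? y = some lb → ((l.foldl pvDsuStep s).1.get? y = some (f lb)) := by
  intro l
  induction l with
  | nil => intro _ s _; exact ⟨id, fun y lb hy => hy⟩
  | cons e rest ih =>
    intro hsub s hInv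
    obtain ⟨f1, hf1⟩ := pvDsuStep_map te s e (hsub e (by simp)) hInv
    obtain ⟨f2, hf2⟩ := ih (fun e' he' => hsub e' (List.mem_cons_of_mem _ he'))
      (pvDsuStep s e) (pvDsuStep_inv te s e (hsub e (by simp)) hInv)
    exact ⟨f2 ∘ f1, fun y lb hy => hf2 y (f1 lb) (hf1 y lb hy)⟩

-- every edge of the processed list ends with equal labels on its endpoints
theorem pvDsuFold_eqlab (te : List (Int × Int)) :
    ∀ (l : List (Int × Int)), (∀ e ∈ l, e ∈ te) →
      ∀ s, pvDsuInv te s →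
      ∀ e ∈ l, ∃ lb, (l.foldl pvDsuStep s).1.get? e.1 = some lb ∧ (l.foldl pvDsuStep s).1.get? e.2 = some lb := by
  intro l
  induction l with
  | nil => intro _ s _ e he; simp at he
  | cons e0 rest ih =>
    intro hsub s hInv e he
    have hsub' : ∀ e' ∈ rest, e' ∈ te := fun e' he' => hsub e' (List.mem_cons_of_mem _ he')
    have hInv' := pvDsuStep_inv te s e0 (hsub e0 (by simp)) hInv
    rcases List.mem_cons.1 he with rfl | hmem
    · obtain ⟨lb, h1, h2⟩ := pvDsuStep_eq te s e (hsub e (by simp)) hInv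
      obtain ⟨f, hf⟩ := pvDsuFold_map te rest hsub' (pvDsuStep s e) hInv'
      exact ⟨f lb, by simpa using hf e.1 lb h1, by simpa using hf e.2 lb h2⟩
    · exact ih hsub' (pvDsuStep s e0) hInv' e hmem

theorem pvDsuInv_empty (te : List (Int × Int)) : pvDsuInv te (PySem.Dict.empty, PySem.Dict.empty) := by
  refine ⟨?_, ?_, ?_⟩
  · intro x l hx; rw [PySem.Dict.get?_empty] at hx; cases hx
  · intro l x
    rw [PySem.Dict.getD_empty, PySem.Dict.get?_empty]
    simp
  · intro T _ x y l hx _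
    rw [PySem.Dict.get?_empty] at hx; cases hx

-- ===== VERDICT (by name: the statement is the Claim_ definition above) =====
theorem verify_steiner_tree_spec : Claim_equal_verify_steiner_tree := by
  intro nv edges terminals te hdom hpre
  unfold Spec_verify_steiner_tree
  cases hf : te.find? (fun e => ((pvEdgeWeights edges).get? (pvKey e.1 e.2)).isNone) with
  | some e =>
    have hA := pvAdjLoop_find?_some (pvEdgeWeights edges) te e hf PySem.Dict.empty 0
    obtain ⟨u, v⟩ := e
    simp only [verify_steiner_tree, verify_steiner_tree_alt, hA, hf]
  | none =>
    obtain ⟨adj, hA⟩ := pvAdjLoop_find?_none (pvEdgeWeights edges) te hf PySem.Dict.empty 0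
    cases hte : te with
    | nil => subst hte; rfl
    | cons e0 rest =>
      obtain ⟨s0, v0⟩ := e0
      subst hte
      -- ---- A side: the BFS visited set ----
      have hv0 : PySem.Set.add PySem.Set.empty s0 = [s0] := rfl
      have hUsub : ∀ k x, x ∈ adj.getD k [] → x ∈ PySem.Set.ofList (s0 :: pvVerts ((s0, v0) :: rest)) := by
        intro k x hx
        rcases pvAdjLoop_sub _ _ _ _ _ _ hA k x hx with h | h
        · simp [PySem.Dict.getD_empty] at h
        · exact (PySem.Set.mem_ofList _ _).2 (List.mem_cons_of_mem _ h)
      have hs0U : s0 ∈ PySem.Set.ofList (s0 :: pvVerts ((s0, v0) :: rest)) :=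
        (PySem.Set.mem_ofList _ _).2 (by simp)
      have hfuel : (1 : Nat) + 2 * ((PySem.Set.ofList (s0 :: pvVerts ((s0, v0) :: rest))).filter
          (fun u => !([s0] : List Int).contains u)).length ≤ 4 * ((s0, v0) :: rest).length + 2 := by
        have hlt : ((PySem.Set.ofList (s0 :: pvVerts ((s0, v0) :: rest))).filter
            (fun u => !([s0] : List Int).contains u)).length
            < (PySem.Set.ofList (s0 :: pvVerts ((s0, v0) :: rest))).length := by
          rw [List.length_filter_lt_length_iff_exists]
          exact ⟨s0, hs0U, by simp⟩
        have hle := pvOfList_len (s0 :: pvVerts ((s0, v0) :: rest))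
        have hlen := pvVerts_length ((s0, v0) :: rest)
        simp only [List.length_cons] at hle hlen ⊢
        omega
      obtain ⟨hsubR, hclosedR⟩ := pvBfs_closed adj _ hUsub
        (4 * ((s0, v0) :: rest).length + 2) [s0] [s0]
        (by simp) (by simp)
        (fun x hx => hx)
        (by intro x hx; simp only [List.mem_singleton] at hx; exact hx ▸ hs0U)
        (by intro x hx hq; exact absurd hx hq)
        hfuel
      have hs0V : s0 ∈ pvBfs adj (4 * ((s0, v0) :: rest).length + 2) [s0] [s0] := hsubR s0 (by simp)
      have hedges := pvAdjLoop_edges _ _ _ _ _ _ hA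
      have hVclosed : pvClosed ((s0, v0) :: rest) (pvBfs adj (4 * ((s0, v0) :: rest).length + 2) [s0] [s0]) := by
        intro e he
        constructor
        · intro h1; exact hclosedR e.1 h1 e.2 (hedges e he).1
        · intro h2; exact hclosedR e.2 h2 e.1 (hedges e he).2
      -- ---- B side: the union-find component ----
      obtain ⟨hI4, hI2, hJ⟩ :
          pvDsuInv ((s0, v0) :: rest) (((s0, v0) :: rest).foldl pvDsuStep (PySem.Dict.empty, PySem.Dict.empty)) :=
        pvDsuFold_inv ((s0, v0) :: rest) ((s0, v0) :: rest) (fun _ h => h) _ (pvDsuInv_empty _)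
      have hEq := pvDsuFold_eqlab ((s0, v0) :: rest) ((s0, v0) :: rest) (fun _ h => h) _ (pvDsuInv_empty _)
      obtain ⟨l0, hL1, hL2⟩ := hEq (s0, v0) (by simp)
      have hgetD : (((s0, v0) :: rest).foldl pvDsuStep (PySem.Dict.empty, PySem.Dict.empty)).1.getD s0 0 = l0 := by
        rw [PySem.Dict.getD_eq_get?_getD, (hL1 : _ = some l0)]
        rfl
      have hmemC : ∀ x, x ∈ (((s0, v0) :: rest).foldl pvDsuStep (PySem.Dict.empty, PySem.Dict.empty)).2.getD l0 []
          ↔ (((s0, v0) :: rest).foldl pvDsuStep (PySem.Dict.empty, PySem.Dict.empty)).1.get? x = some l0 :=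
        fun x => hI2 l0 x
      have hs0C : s0 ∈ (((s0, v0) :: rest).foldl pvDsuStep (PySem.Dict.empty, PySem.Dict.empty)).2.getD l0 [] :=
        (hmemC s0).2 hL1
      have hCclosed : pvClosed ((s0, v0) :: rest)
          ((((s0, v0) :: rest).foldl pvDsuStep (PySem.Dict.empty, PySem.Dict.empty)).2.getD l0 []) := by
        intro e he
        obtain ⟨lb, hb1, hb2⟩ := hEq e he
        rw [hmemC, hmemC, hb1, hb2]
      -- ---- the two sets agree ----
      have hVC : ∀ x, x ∈ pvBfs adj (4 * ((s0, v0) :: rest).length + 2) [s0] [s0]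
          ↔ x ∈ (((s0, v0) :: rest).foldl pvDsuStep (PySem.Dict.empty, PySem.Dict.empty)).2.getD l0 [] := by
        intro x
        constructor
        · intro hx
          refine pvBfs_subset adj _ ?_ (4 * ((s0, v0) :: rest).length + 2) [s0] [s0]
            (by simp) (fun z hz => hz) ?_ x hx
          · intro k z hk hz
            rcases pvAdjLoop_pairs _ _ _ _ _ _ hA k z hz with h | h | h
            · simp [PySem.Dict.getD_empty] at h
            · exact ((hCclosed (k, z) h).1 hk)
            · exact ((hCclosed (z, k) h).2 hk)
          · intro z hz
            simp only [List.mem_singleton] at hz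
            exact hz ▸ hs0C
        · intro hx
          exact (hJ _ hVclosed x s0 l0 ((hmemC x).1 hx) hL1).mpr hs0V
      -- ---- the two missing lists are the same list ----
      have hdiffeq : PySem.Set.diff terminals (pvBfs adj (4 * ((s0, v0) :: rest).length + 2) [s0] [s0])
          = PySem.Set.diff terminals (PySem.Set.ofList
              ((((s0, v0) :: rest).foldl pvDsuStep (PySem.Dict.empty, PySem.Dict.empty)).2.getD l0 [])) := by
        simp only [PySem.Set.diff]
        apply List.filter_congr
        intro t _
        by_cases ht : t ∈ pvBfs adj (4 * ((s0, v0) :: rest).length + 2) [s0] [s0]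
        · have h1 : PySem.Set.contains (pvBfs adj (4 * ((s0, v0) :: rest).length + 2) [s0] [s0]) t = true := by
            simpa [PySem.Set.contains] using ht
          have h2 : PySem.Set.contains (PySem.Set.ofList
              ((((s0, v0) :: rest).foldl pvDsuStep (PySem.Dict.empty, PySem.Dict.empty)).2.getD l0 [])) t = true := by
            simpa [PySem.Set.contains] using (PySem.Set.mem_ofList _ _).2 ((hVC t).1 ht)
          rw [h1, h2]
        · have h1 : PySem.Set.contains (pvBfs adj (4 * ((s0, v0) :: rest).length + 2) [s0] [s0]) t = false := by
            simpa [PySem.Set.contains] using ht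
          have h2 : PySem.Set.contains (PySem.Set.ofList
              ((((s0, v0) :: rest).foldl pvDsuStep (PySem.Dict.empty, PySem.Dict.empty)).2.getD l0 [])) t = false := by
            simpa [PySem.Set.contains] using
              (fun hm => ht ((hVC t).2 ((PySem.Set.mem_ofList _ _).1 hm)))
          rw [h1, h2]
      -- ---- both programs now return the same triple ----
      simp only [verify_steiner_tree, verify_steiner_tree_alt, hA, hf, hv0, hgetD, hdiffeq, zero_add]
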